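-- pv_equiv track=rewrite | github.com/Jerry-code-oss/Luck_Program | Tennis_Detect/Code/Prediction/3dResnet_main.py | filter_hitting_data
-- ===== SOURCE A (Python) =====
-- def filter_hitting_data(hitting_frames, min_duration=2):
--     filtered_data = []
--     current_hitting = []
--
--     for i in range(1, len(hitting_frames)):
--         if hitting_frames[i] - hitting_frames[i - 1] == 1:
--             current_hitting.append(hitting_frames[i - 1])
--         else:
--             if len(current_hitting) >= min_duration:
--                 current_hitting.append(hitting_frames[i - 1])
--                 filtered_data.append(current_hitting)
--             current_hitting = []
--
--     if len(current_hitting) >= min_duration: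
--         current_hitting.append(hitting_frames[-1])
--         filtered_data.append(current_hitting)
--
--     return filtered_data
-- ===== SOURCE B (Python) =====
-- def filter_hitting_data(hitting_frames, min_duration=2):
--     # Staged index-based approach: compute the cut positions (where consecutiveness
--     # breaks), then slice between adjacent cuts and keep slices strictly longer
--     # than min_duration. No run accumulator is maintained.
--     n = len(hitting_frames)
--     cuts = [0] + [i for i in range(1, n)
--                   if hitting_frames[i] - hitting_frames[i - 1] != 1] + [n]
--     return [hitting_frames[a:b] for a, b in zip(cuts, cuts[1:]) if b - a > min_duration]
-- ===== Notes on version B (the rewrite author's own statement) =====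
-- stated objective: simpler
-- what changed: B replaces A's stateful single pass (run accumulator built element-by-element with inline filtering at each break and a final flush) by two staged index comprehensions: first collect the cut positions where consecutiveness breaks, then slice the list between adjacent cuts and keep slices strictly longer than min_duration; no run accumulator or carried loop state exists.
import Mathlib
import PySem

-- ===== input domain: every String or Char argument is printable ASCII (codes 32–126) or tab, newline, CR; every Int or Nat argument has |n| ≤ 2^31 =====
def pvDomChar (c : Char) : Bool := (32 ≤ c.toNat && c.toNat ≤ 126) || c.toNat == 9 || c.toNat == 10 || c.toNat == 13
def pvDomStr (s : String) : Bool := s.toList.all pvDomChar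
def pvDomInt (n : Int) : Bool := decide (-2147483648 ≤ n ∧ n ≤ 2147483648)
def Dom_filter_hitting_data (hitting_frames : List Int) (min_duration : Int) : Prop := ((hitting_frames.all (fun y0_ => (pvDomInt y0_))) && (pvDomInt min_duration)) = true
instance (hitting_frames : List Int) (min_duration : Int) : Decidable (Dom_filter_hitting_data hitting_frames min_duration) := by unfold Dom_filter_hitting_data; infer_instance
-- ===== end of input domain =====

-- B replaces A's stateful single pass by two staged index passes: collect the cut
-- positions where consecutiveness breaks, then slice between adjacent cuts and keep
-- slices strictly longer than min_duration; objective: simpler decomposition.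


-- ===== PORT A =====
-- loop body of A's 'for i in range(1, len(hitting_frames))'; state = (filtered_data, current_hitting)
def fhdStepA (hitting_frames : List Int) (min_duration : Int)
    (st : List (List Int) × List Int) (i : Int) : List (List Int) × List Int :=
  if PySem.List.pyGetD hitting_frames i 0 - PySem.List.pyGetD hitting_frames (i - 1) 0 == 1 then
    (st.1, st.2 ++ [PySem.List.pyGetD hitting_frames (i - 1) 0])
  else if min_duration ≤ (st.2.length : Int) then
    (st.1 ++ [st.2 ++ [PySem.List.pyGetD hitting_frames (i - 1) 0]], [])
  else
    (st.1, [])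

def filter_hitting_data (hitting_frames : List Int) (min_duration : Int) : List (List Int) :=
  let st := (PySem.List.pyRange 1 (hitting_frames.length : Int) 1).foldl
      (fhdStepA hitting_frames min_duration) ([], [])
  if min_duration ≤ (st.2.length : Int) then
    match PySem.List.pyGet? hitting_frames (-1) with   -- the final negative-index access; none = IndexError, excluded by Pre_
    | some z => st.1 ++ [st.2 ++ [z]]
    | none => st.1
  else st.1

-- ===== PORT B =====
-- B's 'cuts' list: [0] + [i for i in range(1, n) if hf[i] - hf[i-1] != 1] + [n]
def fhdCuts (hitting_frames : List Int) : List Int :=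
  0 :: ((PySem.List.pyRange 1 (hitting_frames.length : Int) 1).filter
        (fun i => !(PySem.List.pyGetD hitting_frames i 0 - PySem.List.pyGetD hitting_frames (i - 1) 0 == 1)))
    ++ [(hitting_frames.length : Int)]

def filter_hitting_data_alt (hitting_frames : List Int) (min_duration : Int) : List (List Int) :=
  let cuts := fhdCuts hitting_frames
  ((cuts.zip (PySem.List.slice cuts (some 1) none)).filter
      (fun q => decide (min_duration < q.2 - q.1))).map
    (fun q => PySem.List.slice hitting_frames (some q.1) (some q.2))

-- ===== PRECONDITION & SPEC =====
-- Pre_ excludes only the inputs where A raises IndexError: the empty list with min_duration <= 0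
-- (there len(current_hitting) >= min_duration holds and A indexes the last element of the empty list).
def Pre_filter_hitting_data (hitting_frames : List Int) (min_duration : Int) : Prop :=
  ¬ (hitting_frames = [] ∧ min_duration ≤ 0)
instance (hitting_frames : List Int) (min_duration : Int) : Decidable (Pre_filter_hitting_data hitting_frames min_duration) := by unfold Pre_filter_hitting_data; infer_instance

def pvWitness_filter_hitting_data : List Int × Int := ([1, 2, 3, 7, 8, 10], 2)

def Spec_filter_hitting_data (hitting_frames : List Int) (min_duration : Int) (out : List (List Int)) : Prop := out = filter_hitting_data_alt hitting_frames min_duration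
instance (hitting_frames : List Int) (min_duration : Int) (out : List (List Int)) : Decidable (Spec_filter_hitting_data hitting_frames min_duration out) := by unfold Spec_filter_hitting_data; infer_instance

-- ===== CLAIM (what is proved, stated in full; the proofs are below) =====
def Claim_equal_filter_hitting_data : Prop := ∀ (hitting_frames : List Int) (min_duration : Int), Dom_filter_hitting_data hitting_frames min_duration → Pre_filter_hitting_data hitting_frames min_duration → Spec_filter_hitting_data hitting_frames min_duration (filter_hitting_data hitting_frames min_duration)

-- ===== LEMMAS AND PROOFS =====

-- Proof-internal intermediate form: A's loop re-expressed as a run-building fold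
-- (state = (complete runs so far, current run)), bridging A's state to B's cut positions.
def fhdStepB (st : List (List Int) × List Int) (x : Int) : List (List Int) × List Int :=
  if st.2 ≠ [] ∧ x - st.2.getLastD 0 == 1 then
    (st.1, st.2 ++ [x])
  else
    ((if st.2 ≠ [] then st.1 ++ [st.2] else st.1), [x])

-- the break positions strictly after index j
def fhdTailCuts (xs : List Int) (j : Int) : List Int :=
  (PySem.List.pyRange (j + 1) (xs.length : Int) 1).filter
    (fun i => !(PySem.List.pyGetD xs i 0 - PySem.List.pyGetD xs (i - 1) 0 == 1))

theorem fhd_getElem?_of_drop {xs : List Int} {j : Nat} {p : Int} {t : List Int}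
    (h : xs.drop j = p :: t) : xs[j]? = some p := by
  have hj : j < xs.length := by
    by_contra hle
    simp [List.drop_eq_nil_of_le (Nat.le_of_not_lt hle)] at h
  have hget : xs[j]'hj = p := by
    have h0 : (xs.drop j)[0]'(by simp [h]) = p := by simp [h]
    rw [List.getElem_drop] at h0
    simpa using h0
  simp [List.getElem?_eq_getElem hj, hget]

theorem fhd_last_of_drop {xs : List Int} {j : Nat} {p : Int}
    (h : xs.drop j = [p]) : PySem.List.pyGet? xs (-1) = some p := by
  rw [PySem.List.pyGet?_neg_one]
  have := List.getLast?_drop (l := xs) (i := j)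
  rw [h] at this
  by_cases hl : xs.length ≤ j
  · simp [List.drop_eq_nil_of_le hl] at h
  · simpa [hl] using this.symm

theorem fhd_len_of_drop {xs : List Int} {j : Nat} {p : Int} {t : List Int}
    (h : xs.drop j = p :: t) : xs.length = j + 1 + t.length := by
  have := congrArg List.length h
  simp [List.length_drop] at this
  have hj : j < xs.length := by
    by_contra hle
    simp [List.drop_eq_nil_of_le (Nat.le_of_not_lt hle)] at h
  omega

theorem fhd_filter_snoc (md : Int) (runs : List (List Int)) (cur : List Int) (p : Int) :
    List.filter (fun r => decide (md < (r.length:Int))) (runs ++ [cur ++ [p]])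
    = List.filter (fun r => decide (md < (r.length:Int))) runs
      ++ (if md ≤ (cur.length:Int) then [cur ++ [p]] else []) := by
  by_cases hc : md ≤ (cur.length:Int)
  · have hlt : md < ((cur ++ [p]).length : Int) := by simp; omega
    simp [List.filter_append, hc]
  · have hlt : ¬ md < ((cur ++ [p]).length : Int) := by simp; omega
    simp [List.filter_append, hc]

-- A's fold equals the run-building fold, filtered (proved over the suffix t = xs.drop (j+1)).
theorem fhd_main (md : Int) : ∀ (t : List Int) (p : Int) (j : Nat) (xs : List Int)
    (fd runs : List (List Int)) (cur : List Int),
    xs.drop j = p :: t →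
    fd = runs.filter (fun r => decide (md < (r.length : Int))) →
    (let st := (PySem.List.pyRange ((j:Int)+1) (xs.length : Int) 1).foldl (fhdStepA xs md) (fd, cur);
     if md ≤ (st.2.length : Int) then
       match PySem.List.pyGet? xs (-1) with
       | some z => st.1 ++ [st.2 ++ [z]]
       | none => st.1
     else st.1)
    = (let st := t.foldl fhdStepB (runs, cur ++ [p]);
       let runs' := if st.2 ≠ [] then st.1 ++ [st.2] else st.1;
       runs'.filter (fun r => decide (md < (r.length : Int)))) := by
  intro t
  induction t with
  | nil =>
    intro p j xs fd runs cur h hfd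
    have hlen := fhd_len_of_drop h
    simp only [List.length_nil] at hlen
    have hemp : PySem.List.pyRange ((j:Int)+1) (xs.length : Int) 1 = [] :=
      PySem.List.pyRange_one_eq_nil (by omega)
    simp only [hemp, List.foldl_nil, fhd_last_of_drop h, List.foldl_nil]
    have hne : cur ++ [p] ≠ [] := by simp
    simp only [ne_eq, hne, not_false_eq_true, if_true, fhd_filter_snoc, ← hfd]
    split_ifs <;> simp
  | cons x t' ih =>
    intro p j xs fd runs cur h hfd
    have hlen := fhd_len_of_drop h
    simp only [List.length_cons] at hlen
    have hdrop' : xs.drop (j+1) = x :: t' := by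
      rw [← List.drop_drop, h]; rfl
    have hcons : PySem.List.pyRange ((j:Int)+1) (xs.length : Int) 1
        = ((j:Int)+1) :: PySem.List.pyRange (((j:Int)+1)+1) (xs.length : Int) 1 :=
      PySem.List.pyRange_one_cons (by omega)
    rw [hcons, List.foldl_cons]
    have hgx : PySem.List.pyGetD xs ((j:Int)+1) 0 = x := by
      rw [show ((j:Int)+1) = ((j+1 : Nat) : Int) by push_cast; ring,
          PySem.List.pyGetD_natCast]
      simp [List.getD, fhd_getElem?_of_drop hdrop']
    have hgp : xs[j]? = some p := fhd_getElem?_of_drop h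
    by_cases hx : (x - p == 1) = true
    · have hA : fhdStepA xs md (fd, cur) ((j:Int)+1) = (fd, cur ++ [p]) := by
        simp [fhdStepA, hgx, hgp, hx]
      have hB : fhdStepB (runs, cur ++ [p]) x = (runs, (cur ++ [p]) ++ [x]) := by
        simp [fhdStepB, hx]
      rw [hA, List.foldl_cons, hB]
      have := ih x (j+1) xs fd runs (cur ++ [p]) hdrop' hfd
      simpa [Nat.cast_add] using this
    · have hA : fhdStepA xs md (fd, cur) ((j:Int)+1)
          = ((if md ≤ (cur.length:Int) then fd ++ [cur ++ [p]] else fd), []) := by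
        simp only [fhdStepA, hgx]
        simp [hgp, hx]
        split_ifs <;> simp
      have hB : fhdStepB (runs, cur ++ [p]) x = (runs ++ [cur ++ [p]], [x]) := by
        simp [fhdStepB, hx]
      rw [hA, List.foldl_cons, hB]
      have hfd' : (if md ≤ (cur.length:Int) then fd ++ [cur ++ [p]] else fd)
          = (runs ++ [cur ++ [p]]).filter (fun r => decide (md < (r.length : Int))) := by
        rw [fhd_filter_snoc, ← hfd]
        split_ifs <;> simp
      have := ih x (j+1) xs _ (runs ++ [cur ++ [p]]) [] hdrop' hfd'
      simpa [Nat.cast_add] using this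

-- the adjacent cut pairs starting from pending-run start s, given breaks after index j
def fhdPairs (xs : List Int) (s j : Int) : List (Int × Int) :=
  let l := s :: fhdTailCuts xs j ++ [(xs.length : Int)]
  l.zip l.tail

theorem fhd_slice_snoc (xs : List Int) (s j : Nat) (x : Int) (t' : List Int)
    (h : xs.drop (j+1) = x :: t') (hs : s ≤ j+1) :
    PySem.List.slice xs (some (s:Int)) (some ((j+2:Nat):Int))
    = PySem.List.slice xs (some (s:Int)) (some ((j+1:Nat):Int)) ++ [x] := by
  rw [PySem.List.slice_natCast, PySem.List.slice_natCast]
  rw [show j+2-s = (j+1-s)+1 by omega, List.take_add_one]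
  have hg : (xs.drop s)[j+1-s]? = some x := by
    rw [List.getElem?_drop, show s + (j+1-s) = j+1 by omega]
    exact fhd_getElem?_of_drop h
  simp [hg]

-- the run-building fold equals the slices between adjacent cut positions, with
-- every produced pair (a, b) slicing to a list of length b - a.
theorem fhd_cuts_main (xs : List Int) : ∀ (t : List Int) (p : Int) (j s : Nat)
    (runs : List (List Int)) (c : List Int),
    xs.drop j = p :: t →
    PySem.List.slice xs (some (s:Int)) (some ((j:Int)+1)) = c ++ [p] →
    (c ++ [p]).length = j + 1 - s →
    s ≤ j →
    (let st := t.foldl fhdStepB (runs, c ++ [p]);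
     if st.2 ≠ [] then st.1 ++ [st.2] else st.1)
    = runs ++ (fhdPairs xs (s:Int) (j:Int)).map (fun q => PySem.List.slice xs (some q.1) (some q.2))
    ∧ ∀ q ∈ fhdPairs xs (s:Int) (j:Int),
        ((PySem.List.slice xs (some q.1) (some q.2)).length : Int) = q.2 - q.1 := by
  intro t
  induction t with
  | nil =>
    intro p j s runs c h hsl hlc hsj
    have hlen := fhd_len_of_drop h
    simp only [List.length_nil] at hlen
    have hemp : fhdTailCuts xs (j:Int) = [] := by
      unfold fhdTailCuts
      rw [PySem.List.pyRange_one_eq_nil (by omega)]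
      rfl
    have hslice : PySem.List.slice xs (some (s:Int)) (some ((xs.length:Int))) = c ++ [p] := by
      rw [show ((xs.length:Int)) = ((j:Int)+1) by omega]
      exact hsl
    have hpair : fhdPairs xs (s:Int) (j:Int) = [((s:Int), (xs.length:Int))] := by
      simp [fhdPairs, hemp]
    constructor
    · have hne : c ++ [p] ≠ [] := by simp
      simp [hpair, hne, hslice]
    · intro q hq
      rw [hpair] at hq
      simp only [List.mem_singleton] at hq
      subst hq
      simp only [hslice, hlc]
      omega
  | cons x t' ih =>
    intro p j s runs c h hsl hlc hsj
    have hlen := fhd_len_of_drop h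
    simp only [List.length_cons] at hlen
    have hdrop' : xs.drop (j+1) = x :: t' := by
      rw [← List.drop_drop, h]; rfl
    have hgx : PySem.List.pyGetD xs ((j:Int)+1) 0 = x := by
      rw [show ((j:Int)+1) = ((j+1 : Nat) : Int) by push_cast; ring,
          PySem.List.pyGetD_natCast]
      simp [List.getD, fhd_getElem?_of_drop hdrop']
    have hgp : PySem.List.pyGetD xs ((j:Int)+1-1) 0 = p := by
      rw [show ((j:Int)+1-1) = ((j : Nat) : Int) by omega,
          PySem.List.pyGetD_natCast]
      simp [List.getD, fhd_getElem?_of_drop h]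
    have hcast : ((j+1:Nat):Int) = (j:Int)+1 := by push_cast; ring
    have hcuts : fhdTailCuts xs (j:Int)
        = (if x - p == 1 then [] else [((j:Int)+1)]) ++ fhdTailCuts xs ((j:Int)+1) := by
      unfold fhdTailCuts
      rw [PySem.List.pyRange_one_cons (by omega), List.filter_cons]
      simp only [hgx, hgp]
      by_cases hx : (x - p == 1) = true <;> simp [hx]
    by_cases hx : (x - p == 1) = true
    · -- consecutive: the cut list is unchanged, the run is extended
      have hB : fhdStepB (runs, c ++ [p]) x = (runs, (c ++ [p]) ++ [x]) := by
        simp [fhdStepB, hx]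
      have hslA : PySem.List.slice xs (some (s:Int)) (some ((j+1:Nat):Int)) = c ++ [p] := by
        rw [hcast]; exact hsl
      have hsl' : PySem.List.slice xs (some (s:Int)) (some (((j+1:Nat):Int)+1)) = (c ++ [p]) ++ [x] := by
        rw [show (((j+1:Nat):Int)+1) = ((j+2:Nat):Int) by push_cast; ring,
            fhd_slice_snoc xs s j x t' hdrop' (by omega), hslA]
      obtain ⟨ih1, ih2⟩ := ih x (j+1) s runs (c ++ [p]) hdrop' hsl'
        (by simp only [List.length_append, List.length_cons, List.length_nil] at hlc ⊢; omega)
        (by omega)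
      have hfp : fhdPairs xs (s:Int) (j:Int) = fhdPairs xs (s:Int) ((j+1:Nat):Int) := by
        unfold fhdPairs
        rw [hcast, hcuts, hx]
        simp
      constructor
      · simp only [List.foldl_cons, hB]
        rw [hfp]
        exact ih1
      · rw [hfp]
        exact ih2
    · -- break: the current run is flushed, a new cut is emitted at j+1
      have hB : fhdStepB (runs, c ++ [p]) x = (runs ++ [c ++ [p]], [x]) := by
        simp [fhdStepB, hx]
      have hsl' : PySem.List.slice xs (some ((j+1:Nat):Int)) (some (((j+1:Nat):Int)+1)) = [] ++ [x] := by
        rw [show (((j+1:Nat):Int)+1) = ((j+2:Nat):Int) by push_cast; ring,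
            PySem.List.slice_natCast]
        rw [show j+2-(j+1) = 1 by omega, hdrop']
        rfl
      obtain ⟨ih1, ih2⟩ := ih x (j+1) (j+1) (runs ++ [c ++ [p]]) [] hdrop' hsl'
        (by simp) (by omega)
      rw [hcast] at ih1 ih2
      have hfp : fhdPairs xs (s:Int) (j:Int)
          = ((s:Int), (j:Int)+1) :: fhdPairs xs ((j:Int)+1) ((j:Int)+1) := by
        unfold fhdPairs
        rw [hcuts, if_neg hx]
        simp [List.cons_append]
      have hslA : PySem.List.slice xs (some (s:Int)) (some ((j:Int)+1)) = c ++ [p] := hsl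
      constructor
      · simp only [List.foldl_cons, hB]
        simp only [List.nil_append] at ih1
        rw [hfp]
        exact ih1.trans (by simp [hslA])
      · intro q hq
        rw [hfp] at hq
        rcases List.mem_cons.mp hq with hq | hq
        · subst hq
          simp only [hslA, hlc]
          omega
        · exact ih2 q hq

-- ===== VERDICT (by name: the statement is the Claim_ definition above) =====
theorem filter_hitting_data_spec : Claim_equal_filter_hitting_data := by
  unfold Claim_equal_filter_hitting_data Spec_filter_hitting_data Pre_filter_hitting_data
  intro hf md _ hpre
  cases hf with
  | nil =>
    have hmd : ¬ md ≤ (0:Int) := fun hle => hpre ⟨rfl, hle⟩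
    have hr : PySem.List.pyRange 1 (0:Int) 1 = [] := PySem.List.pyRange_one_eq_nil (by norm_num)
    simp [filter_hitting_data, filter_hitting_data_alt, fhdCuts, PySem.List.slice_from_one, hr, hmd]
    all_goals omega
  | cons p t =>
    have hmain := fhd_main md t p 0 (p::t) [] [] [] (by simp) (by simp)
    simp only [Nat.cast_zero, zero_add] at hmain
    have hsl0 : PySem.List.slice (p::t) (some ((0:Nat):Int)) (some (((0:Nat):Int)+1)) = [] ++ [p] := by
      rw [show (((0:Nat):Int)+1) = ((1:Nat):Int) by norm_num, PySem.List.slice_natCast]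
      rfl
    obtain ⟨h1, h2⟩ := fhd_cuts_main (p::t) t p 0 0 [] [] (by simp) hsl0 (by simp) (by omega)
    simp only [Nat.cast_zero, List.nil_append] at h1 h2
    show filter_hitting_data (p::t) md = filter_hitting_data_alt (p::t) md
    unfold filter_hitting_data
    rw [hmain]
    simp only [List.nil_append]
    rw [h1]
    rw [List.filter_map]
    have hcg : (fhdPairs (p::t) 0 0).filter
          ((fun r => decide (md < (r.length : Int))) ∘ (fun q => PySem.List.slice (p::t) (some q.1) (some q.2)))
        = (fhdPairs (p::t) 0 0).filter (fun q => decide (md < q.2 - q.1)) := by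
      apply List.filter_congr
      intro q hq
      simp only [Function.comp_apply]
      rw [h2 q hq]
    rw [hcg]
    have hfc : fhdCuts (p::t) = (0:Int) :: fhdTailCuts (p::t) 0 ++ [(((p::t).length):Int)] := by
      unfold fhdCuts fhdTailCuts
      norm_num
    unfold filter_hitting_data_alt
    rw [hfc]
    simp only [PySem.List.slice_from_one]
    rfl
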